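-- pv_equiv track=rewrite | github.com/amol179/DSA_Notes_Dump | Code_Chef/0current - redundant.py | find_min_cost_operations
-- ===== SOURCE A (Python) =====
-- def find_min_cost_operations(array):
--     total_cost = 0
--     operations = []
--     target_value = min(array)  # Target value to transform the array to the minimum element
--
--     # Iterate over the array and find ranges to minimize
--     i = 0
--     while i < len(array):
--         if array[i] != target_value:
--             L = i + 1
--             while i < len(array) and array[i] != target_value:
--                 i += 1
--             R = i
--             x = target_value
--             cost = (R - L + 1) * x
--
--             # Apply the operation to the array
--             for j in range(L - 1, R):
--                 array[j] = x
--
--             operations.append((L, R, x))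
--             total_cost += cost
--         i += 1
--
--     return array, total_cost, operations
-- ===== SOURCE B (Python) =====
-- def find_min_cost_operations(array):
--     target = min(array)
--     n = len(array)
--     bad = [v != target for v in array]
--     starts = [i + 1 for i in range(n) if bad[i] and (i == 0 or not bad[i - 1])]
--     ends = [i + 1 for i in range(n) if bad[i] and (i == n - 1 or not bad[i + 1])]
--     operations = [(s, e, target) for s, e in zip(starts, ends)]
--     total_cost = target * sum(bad)
--     array[:] = [target] * n
--     return array, total_cost, operations
-- ===== Notes on version B (the rewrite author's own statement) =====
-- stated objective: simpler
-- what changed: Replaces A's stateful nested while-loop scan (per-run partial mutation and cost accumulation) with staged closed forms: a boolean mask, two boundary comprehensions zipped into the operations list, total = min * count of non-min elements, and final array = [min]*len via one slice assignment.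
-- outside the precondition, e.g. on find_min_cost_operations([]): A raises ValueError, B raises ValueError
import Mathlib
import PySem

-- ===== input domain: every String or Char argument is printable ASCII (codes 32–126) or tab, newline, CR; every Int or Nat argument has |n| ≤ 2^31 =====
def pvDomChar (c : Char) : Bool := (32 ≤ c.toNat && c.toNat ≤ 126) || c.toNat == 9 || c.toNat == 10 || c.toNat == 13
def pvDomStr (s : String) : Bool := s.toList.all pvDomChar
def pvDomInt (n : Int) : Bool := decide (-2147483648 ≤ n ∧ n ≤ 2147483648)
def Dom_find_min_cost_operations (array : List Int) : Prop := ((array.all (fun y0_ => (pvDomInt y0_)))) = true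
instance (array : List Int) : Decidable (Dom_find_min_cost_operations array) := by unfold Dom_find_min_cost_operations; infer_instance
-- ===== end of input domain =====

-- B replaces A's stateful while-loop scan (with partial in-place run filling and per-run cost
-- accumulation) by staged closed forms: a boolean mask, two boundary comprehensions zipped into the
-- operations list, total = min * (count of non-min elements), final array = [min]*len (objective:
-- simpler).  Both A and B mutate the argument list in place to the same final contents; the
-- equivalence proved here is about the RETURN value.

-- ===== PORT A =====
-- inner `while i < len(array) and array[i] != target_value: i += 1`; returns the final i
def pvScanA (arr : List Int) (t : Int) (i : Nat) : Nat :=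
  if _h : i < arr.length ∧ arr.getD i 0 ≠ t then pvScanA arr t (i + 1) else i
termination_by arr.length - i
decreasing_by omega

theorem pvScanA_ge (arr : List Int) (t : Int) (i : Nat) : i ≤ pvScanA arr t i := by
  unfold pvScanA
  split
  · exact le_trans (Nat.le_succ i) (pvScanA_ge arr t (i + 1))
  · exact le_refl i
termination_by arr.length - i
decreasing_by rename_i h; omega

-- `for j in range(L-1, R): array[j] = x`
def pvFillA (arr : List Int) (x : Int) (a n : Nat) : List Int :=
  (List.range' a n).foldl (fun acc j => acc.set j x) arr

theorem pvFillA_length (arr : List Int) (x : Int) (a n : Nat) :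
    (pvFillA arr x a n).length = arr.length := by
  induction n generalizing a arr with
  | zero => simp [pvFillA]
  | succ m ih =>
      show ((List.range' a (m+1)).foldl (fun acc j => acc.set j x) arr).length = arr.length
      rw [show List.range' a (m+1) = a :: List.range' (a+1) m from rfl]
      simpa [List.foldl_cons] using ih (arr.set a x) (a + 1)

-- outer `while i < len(array)` loop of A, carrying (array, total_cost, operations);
-- the Python locals L, R, cost, and the filled array are inlined (same values, same order)
def pvGoA (arr : List Int) (t : Int) (i : Nat) (total : Int) (ops : List (Int × Int × Int)) :
    List Int × Int × List (Int × Int × Int) :=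
  if _h : i < arr.length then
    if arr.getD i 0 ≠ t then
      pvGoA (pvFillA arr t i (pvScanA arr t i - i)) t (pvScanA arr t i + 1)
        (total + (((pvScanA arr t i : Nat) : Int) - ((i : Int) + 1) + 1) * t)
        (ops ++ [((i : Int) + 1, ((pvScanA arr t i : Nat) : Int), t)])
    else
      pvGoA arr t (i + 1) total ops
  else (arr, total, ops)
termination_by arr.length - i
decreasing_by
  · have h1 := pvScanA_ge arr t i
    have h2 := pvFillA_length arr t i (pvScanA arr t i - i)
    omega
  · omega

def find_min_cost_operations (array : List Int) : List Int × Int × (List (Int × Int × Int)) :=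
  match PySem.List.min? array (fun x => x) with
  | none => ([], 0, [])  -- min([]) raises ValueError; excluded by Pre_
  | some target => pvGoA array target 0 0 []

-- ===== PORT B =====
-- Source B: boolean mask `bad`, two boundary comprehensions (run starts / run ends, 1-based), zip them
-- into the operations, closed-form total and final array.
def find_min_cost_operations_alt (array : List Int) : List Int × Int × (List (Int × Int × Int)) :=
  match PySem.List.min? array (fun x => x) with
  | none => ([], 0, [])  -- min([]) raises ValueError; excluded by Pre_
  | some target =>
      let n := array.length
      let bad : List Bool := array.map (fun v => decide (v ≠ target))
      let starts : List Int :=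
        ((List.range n).filter (fun i => bad.getD i false && (i == 0 || !bad.getD (i - 1) false))).map
          (fun i => (i : Int) + 1)
      let ends : List Int :=
        ((List.range n).filter (fun i => bad.getD i false && (i == n - 1 || !bad.getD (i + 1) false))).map
          (fun i => (i : Int) + 1)
      (List.replicate n target,
       target * ((bad.count true : Nat) : Int),
       (starts.zip ends).map (fun p => (p.1, p.2, target)))

-- ===== PRECONDITION & SPEC =====
-- Pre_ excludes only the empty list, on which A (and B) raise ValueError from min([]).
def Pre_find_min_cost_operations (array : List Int) : Prop := array ≠ []
instance (array : List Int) : Decidable (Pre_find_min_cost_operations array) := by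
  unfold Pre_find_min_cost_operations; infer_instance

def pvWitness_find_min_cost_operations : List Int := [3, 1, 4, 4, 1]

def Spec_find_min_cost_operations (array : List Int) (out : List Int × Int × (List (Int × Int × Int))) : Prop := out = find_min_cost_operations_alt array
instance (array : List Int) (out : List Int × Int × (List (Int × Int × Int))) : Decidable (Spec_find_min_cost_operations array out) := by unfold Spec_find_min_cost_operations; infer_instance

-- ===== CLAIM (what is proved, stated in full; the proofs are below) =====
def Claim_equal_find_min_cost_operations : Prop := ∀ (array : List Int), Dom_find_min_cost_operations array → Pre_find_min_cost_operations array → Spec_find_min_cost_operations array (find_min_cost_operations array)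

-- ===== LEMMAS AND PROOFS =====

theorem pvScanA_le (arr : List Int) (t : Int) (i : Nat) (h : i ≤ arr.length) :
    pvScanA arr t i ≤ arr.length := by
  unfold pvScanA
  split
  · exact pvScanA_le arr t (i + 1) (by omega)
  · exact h
termination_by arr.length - i
decreasing_by rename_i h'; omega

theorem pvScanA_ne (arr : List Int) (t : Int) (i : Nat) :
    ∀ j, i ≤ j → j < pvScanA arr t i → arr.getD j 0 ≠ t := by
  unfold pvScanA
  split
  · rename_i h
    intro j hij hj
    rcases Nat.eq_or_lt_of_le hij with rfl | hlt
    · exact h.2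
    · exact pvScanA_ne arr t (i + 1) j hlt hj
  · intro j hij hj; omega
termination_by arr.length - i
decreasing_by rename_i h; omega

theorem pvScanA_stop (arr : List Int) (t : Int) (i : Nat) :
    pvScanA arr t i < arr.length → arr.getD (pvScanA arr t i) 0 = t := by
  rw [pvScanA]
  split
  · exact pvScanA_stop arr t (i + 1)
  · rename_i hneg
    intro h
    by_contra hne
    exact hneg ⟨h, hne⟩
termination_by arr.length - i
decreasing_by rename_i h'; omega

theorem pvScanA_gt (arr : List Int) (t : Int) (i : Nat)
    (h1 : i < arr.length) (h2 : arr.getD i 0 ≠ t) : i < pvScanA arr t i := by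
  rw [pvScanA, dif_pos ⟨h1, h2⟩]
  have := pvScanA_ge arr t (i + 1)
  omega

-- closed form of the fill loop
theorem pvFillA_eq (arr : List Int) (x : Int) (a n : Nat) (h : a + n ≤ arr.length) :
    pvFillA arr x a n = arr.take a ++ List.replicate n x ++ arr.drop (a + n) := by
  induction n generalizing a arr with
  | zero => simp [pvFillA]
  | succ m ih =>
      have hstep : pvFillA arr x a (m + 1) = pvFillA (arr.set a x) x (a + 1) m := rfl
      rw [hstep, ih (arr.set a x) (a + 1) (by simp; omega)]
      apply List.ext_getElem
      · simp; omega
      · intro j hj1 hj2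
        simp only [List.getElem_append, List.getElem_take, List.getElem_drop,
          List.getElem_replicate, List.length_append, List.length_take, List.length_replicate,
          List.length_set, List.length_drop, List.getElem_set] at *
        have h1 : min (a + 1) arr.length = a + 1 := by omega
        have h2 : min a arr.length = a := by omega
        rw [h1, h2] at *
        split_ifs <;> (try rfl) <;> (try omega) <;> (congr 1 <;> omega)

-- Proof-side intermediate: the canonical run recursion (`start` holds the 1-based index where the
-- current run of non-target values began); A's loop and B's zip of boundary comprehensions are both
-- proved equal to it.
def pvGoB (l : List Int) (t : Int) (idx : Int) (start : Option Int) (ops : List (Int × Int × Int)) :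
    List (Int × Int × Int) :=
  match l with
  | [] =>
      match start with
      | some s => ops ++ [(s, idx - 1, t)]
      | none => ops
  | v :: rest =>
      if v ≠ t then
        match start with
        | none => pvGoB rest t (idx + 1) (some idx) ops
        | some s => pvGoB rest t (idx + 1) (some s) ops
      else
        match start with
        | some s => pvGoB rest t (idx + 1) none (ops ++ [(s, idx - 1, t)])
        | none => pvGoB rest t (idx + 1) none ops

-- pvGoB only ever appends to the accumulator
theorem pvGoB_acc (l : List Int) (t idx : Int) (st : Option Int) (ops : List (Int × Int × Int)) :
    pvGoB l t idx st ops = ops ++ pvGoB l t idx st [] := by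
  induction l generalizing idx st ops with
  | nil => cases st <;> simp [pvGoB]
  | cons v rest ih =>
      by_cases hv : v = t
      · cases st with
        | none =>
            rw [show pvGoB (v :: rest) t idx none ops = pvGoB rest t (idx + 1) none ops from by simp [pvGoB, hv],
              show pvGoB (v :: rest) t idx none [] = pvGoB rest t (idx + 1) none [] from by simp [pvGoB, hv]]
            exact ih _ _ _
        | some s =>
            rw [show pvGoB (v :: rest) t idx (some s) ops = pvGoB rest t (idx + 1) none (ops ++ [(s, idx - 1, t)]) from by simp [pvGoB, hv],
              show pvGoB (v :: rest) t idx (some s) [] = pvGoB rest t (idx + 1) none [(s, idx - 1, t)] from by simp [pvGoB, hv]]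
            rw [ih (idx + 1) none (ops ++ [(s, idx - 1, t)]), ih (idx + 1) none [(s, idx - 1, t)]]
            simp
      · cases st with
        | none =>
            rw [show pvGoB (v :: rest) t idx none ops = pvGoB rest t (idx + 1) (some idx) ops from by simp [pvGoB, hv],
              show pvGoB (v :: rest) t idx none [] = pvGoB rest t (idx + 1) (some idx) [] from by simp [pvGoB, hv]]
            exact ih _ _ _
        | some s =>
            rw [show pvGoB (v :: rest) t idx (some s) ops = pvGoB rest t (idx + 1) (some s) ops from by simp [pvGoB, hv],
              show pvGoB (v :: rest) t idx (some s) [] = pvGoB rest t (idx + 1) (some s) [] from by simp [pvGoB, hv]]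
            exact ih _ _ _

-- single-step reductions of pvGoB
theorem pvGoB_cons_ne_none (v : Int) (rest : List Int) (t idx : Int) (ops : List (Int × Int × Int))
    (h : v ≠ t) : pvGoB (v :: rest) t idx none ops = pvGoB rest t (idx + 1) (some idx) ops := by
  simp [pvGoB, h]

theorem pvGoB_cons_ne_some (v : Int) (rest : List Int) (t idx s : Int) (ops : List (Int × Int × Int))
    (h : v ≠ t) : pvGoB (v :: rest) t idx (some s) ops = pvGoB rest t (idx + 1) (some s) ops := by
  simp [pvGoB, h]

theorem pvGoB_cons_eq_some (rest : List Int) (t idx s : Int) (ops : List (Int × Int × Int)) :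
    pvGoB (t :: rest) t idx (some s) ops = pvGoB rest t (idx + 1) none (ops ++ [(s, idx - 1, t)]) := by
  simp [pvGoB]

theorem pvGoB_cons_eq_none (rest : List Int) (t idx : Int) (ops : List (Int × Int × Int)) :
    pvGoB (t :: rest) t idx none ops = pvGoB rest t (idx + 1) none ops := by
  simp [pvGoB]

theorem pvGoB_nil_some (t idx s : Int) (ops : List (Int × Int × Int)) :
    pvGoB [] t idx (some s) ops = ops ++ [(s, idx - 1, t)] := by
  simp [pvGoB]

-- a run of non-target values is skipped with `start` unchanged
theorem pvGoB_run (l1 l2 : List Int) (t idx s : Int) (ops : List (Int × Int × Int))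
    (h : ∀ v ∈ l1, v ≠ t) :
    pvGoB (l1 ++ l2) t idx (some s) ops = pvGoB l2 t (idx + l1.length) (some s) ops := by
  induction l1 generalizing idx with
  | nil => simp
  | cons v rest ih =>
      have hv : v ≠ t := h v (by simp)
      simp only [List.cons_append, pvGoB, if_pos, hv, ne_eq, not_false_eq_true, ite_true]
      rw [ih (idx + 1) (fun w hw => h w (by simp [hw]))]
      have hlen : idx + ((v :: rest).length : Int) = idx + 1 + ((rest.length : Nat) : Int) := by
        push_cast [List.length_cons]; ring
      rw [hlen]

-- count of non-target elements of the tail from index i, as an Int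
def pvCnt (l : List Int) (t : Int) : Int := ((l.filter (fun v => v ≠ t)).length : Nat)

-- main invariant for A: once the first i cells already hold t, A's outer loop produces
-- the flattened array, the closed-form cost, and the run recursion's list for the remaining tail
theorem pvGoA_inv (n : Nat) : ∀ (arr : List Int) (t : Int) (i : Nat) (total : Int)
    (ops : List (Int × Int × Int)),
    arr.length - i = n → i ≤ arr.length → arr.take i = List.replicate i t →
    pvGoA arr t i total ops =
      (List.replicate arr.length t,
       total + t * pvCnt (arr.drop i) t,
       ops ++ pvGoB (arr.drop i) t ((i : Int) + 1) none []) := by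
  induction n using Nat.strong_induction_on with
  | _ n ih =>
    intro arr t i total ops hn hle htake
    by_cases hi : i < arr.length
    · have hdrop : arr.drop i = arr.getD i 0 :: arr.drop (i + 1) := by
        rw [List.getD_eq_getElem _ _ hi, List.drop_eq_getElem_cons hi]
      by_cases hv : arr.getD i 0 = t
      · -- skip branch
        rw [pvGoA, dif_pos hi, if_neg (by simpa using hv)]
        have hgi : arr[i]'hi = t := by
          rw [← List.getD_eq_getElem arr 0 hi]; exact hv
        have htake' : arr.take (i + 1) = List.replicate (i + 1) t := by
          rw [List.take_succ, htake, List.getElem?_eq_getElem hi, hgi]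
          simp [List.replicate_succ']
        rw [ih (arr.length - (i + 1)) (by omega) arr t (i + 1) total ops rfl (by omega) htake']
        have hcntskip : pvCnt (arr.drop (i + 1)) t = pvCnt (arr.drop i) t := by
          rw [hdrop, hv]; simp [pvCnt]
        have hcast : (((i + 1 : Nat) : Int)) + 1 = (i : Int) + 1 + 1 := by push_cast; ring
        have hgoskip : pvGoB (arr.drop i) t ((i : Int) + 1) none [] =
            pvGoB (arr.drop (i + 1)) t (((i + 1 : Nat) : Int) + 1) none [] := by
          conv_lhs => rw [hdrop, hv]
          rw [pvGoB_cons_eq_none, hcast]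
        rw [hcntskip, hgoskip]
      · -- run branch
        rw [pvGoA, dif_pos hi, if_pos (by simpa using hv)]
        generalize hR : pvScanA arr t i = R
        have hRgt : i < R := hR ▸ pvScanA_gt arr t i hi hv
        have hRle : R ≤ arr.length := hR ▸ pvScanA_le arr t i hle
        have hne : ∀ j, i ≤ j → j < R → arr.getD j 0 ≠ t := hR ▸ pvScanA_ne arr t i
        have hstop' : R < arr.length → arr.getD R 0 = t := hR ▸ pvScanA_stop arr t i
        -- the filled array
        have hfill : pvFillA arr t i (R - i) = List.replicate R t ++ arr.drop R := by
          rw [pvFillA_eq arr t i (R - i) (by omega), htake,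
            show i + (R - i) = R from by omega, ← List.replicate_add,
            show i + (R - i) = R from by omega]
        have hlenfill : (pvFillA arr t i (R - i)).length = arr.length :=
          pvFillA_length arr t i (R - i)
        -- decompose the tail into the run and the rest
        have hsplit : arr.drop i = (arr.drop i).take (R - i) ++ arr.drop R := by
          conv_lhs => rw [← List.take_append_drop (R - i) (arr.drop i)]
          rw [List.drop_drop, show i + (R - i) = R from by omega]
        have hseg_ne : ∀ v ∈ (arr.drop i).take (R - i), v ≠ t := by
          intro v hvmem hvt
          obtain ⟨k, hk, hkeq⟩ := List.mem_iff_getElem.mp hvmem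
          have hklt : k < R - i := by simp at hk; omega
          have hidx : i + k < arr.length := by omega
          have hv2 : arr[i + k]'hidx = v := by
            rw [← hkeq]; simp [List.getElem_take, List.getElem_drop]
          exact hne (i + k) (by omega) (by omega)
            (by rw [List.getD_eq_getElem arr 0 hidx, hv2, hvt])
        -- head of the run
        have hhead : (arr.drop i).take (R - i) =
            arr.getD i 0 :: ((arr.drop (i + 1)).take (R - i - 1)) := by
          rw [hdrop, show R - i = (R - i - 1) + 1 from by omega]
          rfl
        have hlen2 : ((arr.drop (i + 1)).take (R - i - 1)).length = R - i - 1 := by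
          simp; omega
        -- count over the run
        have hcnt : pvCnt (arr.drop i) t = ((R : Int) - i) + pvCnt (arr.drop R) t := by
          conv_lhs => rw [hsplit]
          unfold pvCnt
          rw [List.filter_append, List.length_append,
            List.filter_eq_self.mpr (by intro a ha; simpa using hseg_ne a ha)]
          have : ((arr.drop i).take (R - i)).length = R - i := by simp; omega
          rw [this]
          push_cast
          omega
        -- the run recursion reaches the end of the run with start = i+1
        have hgoB : pvGoB (arr.drop i) t ((i : Int) + 1) none [] =
            pvGoB (arr.drop R) t ((R : Int) + 1) (some ((i : Int) + 1)) [] := by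
          conv_lhs => rw [hsplit, hhead]
          rw [List.cons_append,
            pvGoB_cons_ne_none _ _ _ _ _ hv,
            pvGoB_run _ _ _ _ _ _
              (fun v hvm => hseg_ne v (by rw [hhead]; exact List.mem_cons_of_mem _ hvm)),
            hlen2, show (i : Int) + 1 + 1 + ((R - i - 1 : Nat) : Int) = (R : Int) + 1 from by omega]
        by_cases hRlen : R < arr.length
        · -- the run stops at a target cell
          have hstop : arr.getD R 0 = t := hstop' hRlen
          have hdropR : arr.drop R = arr.getD R 0 :: arr.drop (R + 1) := by
            rw [List.getD_eq_getElem _ _ hRlen, List.drop_eq_getElem_cons hRlen]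
          have hpeel : pvGoB (arr.drop R) t ((R : Int) + 1) (some ((i : Int) + 1)) [] =
              ((i : Int) + 1, (R : Int), t) ::
                pvGoB (arr.drop (R + 1)) t (((R + 1 : Nat) : Int) + 1) none [] := by
            conv_lhs => rw [hdropR, hstop]
            rw [pvGoB_cons_eq_some,
              pvGoB_acc, show (R : Int) + 1 - 1 = (R : Int) from by ring,
              show (((R + 1 : Nat) : Int)) + 1 = (R : Int) + 1 + 1 from by push_cast; ring]
            simp
          have hcnt2 : pvCnt (arr.drop R) t = pvCnt (arr.drop (R + 1)) t := by
            rw [hdropR, hstop]; simp [pvCnt]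
          have harr2 : pvFillA arr t i (R - i) =
              List.replicate (R + 1) t ++ arr.drop (R + 1) := by
            rw [hfill]
            conv_lhs => rw [hdropR, hstop]
            rw [List.replicate_succ', List.append_assoc]
            rfl
          have htake2 : (pvFillA arr t i (R - i)).take (R + 1) = List.replicate (R + 1) t := by
            rw [harr2, List.take_append_of_le_length (by simp)]
            simp
          have hdrop2 : (pvFillA arr t i (R - i)).drop (R + 1) = arr.drop (R + 1) := by
            rw [harr2]
            exact List.drop_left' (by simp)
          rw [ih (arr.length - (R + 1)) (by omega) (pvFillA arr t i (R - i)) t (R + 1) _ _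
            (by rw [hlenfill]) (by rw [hlenfill]; omega) htake2]
          rw [hlenfill, hdrop2, hcnt, hcnt2, hgoB, hpeel]
          exact congrArg₂ Prod.mk rfl (congrArg₂ Prod.mk (by ring) (by simp))
        · -- the run reaches the end of the array: the next iteration exits at once
          have hReq : R = arr.length := by omega
          have hnil : arr.drop R = [] := List.drop_eq_nil_of_le (by omega)
          rw [pvGoA, dif_neg (by rw [hlenfill]; omega)]
          rw [hcnt, hgoB, hnil]
          have hfill2 : pvFillA arr t i (R - i) = List.replicate arr.length t := by
            rw [hfill, hnil, hReq]; simp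
          rw [hfill2]
          refine congrArg₂ Prod.mk rfl (congrArg₂ Prod.mk (by simp [pvCnt]; ring) ?_)
          rw [pvGoB_nil_some, show (R : Int) + 1 - 1 = (R : Int) from by ring]
          simp
    · -- i ≥ arr.length : loop exits
      have hieq : i = arr.length := by omega
      rw [pvGoA, dif_neg hi]
      rw [hieq] at htake ⊢
      have : arr.drop arr.length = [] := by simp
      rw [this]
      exact congrArg₂ Prod.mk (by simpa using htake)
        (congrArg₂ Prod.mk (by simp [pvCnt]) (by simp [pvGoB]))

-- ===== B-side: the zip of B's boundary comprehensions equals the run recursion =====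

-- B's boolean mask and boundary conditions, named for the proofs (exactly the port's expressions)
def pvBad (arr : List Int) (t : Int) : List Bool := arr.map (fun v => decide (v ≠ t))

def pvStartCond (arr : List Int) (t : Int) (i : Nat) : Bool :=
  (pvBad arr t).getD i false && (i == 0 || !(pvBad arr t).getD (i - 1) false)

def pvEndCond (arr : List Int) (t : Int) (i : Nat) : Bool :=
  (pvBad arr t).getD i false && (i == arr.length - 1 || !(pvBad arr t).getD (i + 1) false)

-- B's starts / ends comprehensions restricted to indices ≥ k
def pvSt (arr : List Int) (t : Int) (k : Nat) : List Int :=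
  ((List.range' k (arr.length - k)).filter (pvStartCond arr t)).map (fun i => (i : Int) + 1)

def pvEn (arr : List Int) (t : Int) (k : Nat) : List Int :=
  ((List.range' k (arr.length - k)).filter (pvEndCond arr t)).map (fun i => (i : Int) + 1)

theorem pvBad_get?_lt (arr : List Int) (t : Int) (i : Nat) (h : i < arr.length) :
    (pvBad arr t)[i]? = some (decide (arr.getD i 0 ≠ t)) := by
  simp [pvBad, List.getElem?_eq_getElem h, List.getD_eq_getElem _ _ h]

theorem pvBad_some_false (arr : List Int) (t : Int) (i : Nat) (h : i < arr.length)
    (hv : arr.getD i 0 = t) : (pvBad arr t)[i]? = some false := by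
  rw [pvBad_get?_lt arr t i h]; simp; exact hv

theorem pvBad_some_true (arr : List Int) (t : Int) (i : Nat) (h : i < arr.length)
    (hv : arr.getD i 0 ≠ t) : (pvBad arr t)[i]? = some true := by
  rw [pvBad_get?_lt arr t i h]; simp; exact hv

theorem pvSt_peel (arr : List Int) (t : Int) (k : Nat) (h : k < arr.length) :
    pvSt arr t k =
      if pvStartCond arr t k = true then ((k : Int) + 1) :: pvSt arr t (k + 1)
      else pvSt arr t (k + 1) := by
  have h1 : arr.length - k = (arr.length - (k + 1)) + 1 := by omega
  rw [pvSt, h1, List.range'_succ, List.filter_cons]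
  split_ifs with hc
  · simp [pvSt, hc]
  · simp [pvSt]

theorem pvEn_peel (arr : List Int) (t : Int) (k : Nat) (h : k < arr.length) :
    pvEn arr t k =
      if pvEndCond arr t k = true then ((k : Int) + 1) :: pvEn arr t (k + 1)
      else pvEn arr t (k + 1) := by
  have h1 : arr.length - k = (arr.length - (k + 1)) + 1 := by omega
  rw [pvEn, h1, List.range'_succ, List.filter_cons]
  split_ifs with hc
  · simp [pvEn, hc]
  · simp [pvEn]

theorem pvSt_end (arr : List Int) (t : Int) : pvSt arr t arr.length = [] := by
  simp [pvSt]

theorem pvEn_end (arr : List Int) (t : Int) : pvEn arr t arr.length = [] := by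
  simp [pvEn]

-- main invariant for B: from position k, the run recursion equals the zip of the remaining
-- boundary comprehensions (part (a): no run open; part (b): a run is open, its closing end is
-- the head of the ends list from k-1)
theorem pvZip_inv (arr : List Int) (t : Int) (k : Nat) (hk : k ≤ arr.length) :
    ((k = 0 ∨ arr.getD (k - 1) 0 = t) →
       pvGoB (arr.drop k) t ((k : Int) + 1) none [] =
         ((pvSt arr t k).zip (pvEn arr t k)).map (fun p => (p.1, p.2, t))) ∧
    ((1 ≤ k ∧ arr.getD (k - 1) 0 ≠ t) →
       ∃ e rest, pvEn arr t (k - 1) = e :: rest ∧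
         ∀ s, pvGoB (arr.drop k) t ((k : Int) + 1) (some s) [] =
           (s, e, t) :: ((pvSt arr t k).zip rest).map (fun p => (p.1, p.2, t))) := by
  constructor
  · intro hprev
    by_cases hkn : k < arr.length
    · have hdrop : arr.drop k = arr.getD k 0 :: arr.drop (k + 1) := by
        rw [List.getD_eq_getElem _ _ hkn, List.drop_eq_getElem_cons hkn]
      have hidx : (k : Int) + 1 + 1 = ((k + 1 : Nat) : Int) + 1 := by push_cast; ring
      by_cases hbk : arr.getD k 0 = t
      · -- not in a run, current cell already target
        have hscF : pvStartCond arr t k = false := by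
          simp [pvStartCond, pvBad_some_false arr t k hkn hbk]
        have hecF : pvEndCond arr t k = false := by
          simp [pvEndCond, pvBad_some_false arr t k hkn hbk]
        rw [pvSt_peel arr t k hkn, pvEn_peel arr t k hkn, hscF, hecF]
        simp only [Bool.false_eq_true, if_false]
        rw [hdrop, hbk, pvGoB_cons_eq_none, hidx]
        exact (pvZip_inv arr t (k + 1) (by omega)).1
          (Or.inr (by simpa using hbk))
      · -- a run starts at k
        have hscT : pvStartCond arr t k = true := by
          rcases hprev with h0 | hpt
          · subst h0; simp [pvStartCond, pvBad_some_true arr t 0 hkn hbk]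
          · have hkm : k - 1 < arr.length := by omega
            simp [pvStartCond, pvBad_some_true arr t k hkn hbk,
              pvBad_some_false arr t (k - 1) hkm hpt]
        obtain ⟨e, rest, hEn, hgo⟩ :=
          (pvZip_inv arr t (k + 1) (by omega)).2 ⟨by omega, by simpa using hbk⟩
        simp only [Nat.add_sub_cancel] at hEn
        rw [pvSt_peel arr t k hkn, hscT, if_pos rfl, hEn]
        rw [hdrop, pvGoB_cons_ne_none _ _ _ _ _ hbk, hidx, hgo ((k : Int) + 1)]
        simp
    · have hke : k = arr.length := by omega
      subst hke
      simp [pvSt_end, pvEn_end, pvGoB]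
  · rintro ⟨hk1, hbkm⟩
    have hkm1 : k - 1 < arr.length := by omega
    have hk1e : k - 1 + 1 = k := by omega
    have hbadkm : (pvBad arr t)[k - 1]? = some true :=
      pvBad_some_true arr t (k - 1) hkm1 hbkm
    by_cases hkn : k < arr.length
    · have hdrop : arr.drop k = arr.getD k 0 :: arr.drop (k + 1) := by
        rw [List.getD_eq_getElem _ _ hkn, List.drop_eq_getElem_cons hkn]
      have hidx : (k : Int) + 1 + 1 = ((k + 1 : Nat) : Int) + 1 := by push_cast; ring
      by_cases hbk : arr.getD k 0 = t
      · -- the open run closes at k-1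
        have hecT : pvEndCond arr t (k - 1) = true := by
          simp [pvEndCond, hbadkm, hk1e, pvBad_some_false arr t k hkn hbk]
        have hscF : pvStartCond arr t k = false := by
          simp [pvStartCond, pvBad_some_false arr t k hkn hbk]
        have hecFk : pvEndCond arr t k = false := by
          simp [pvEndCond, pvBad_some_false arr t k hkn hbk]
        refine ⟨(k : Int), pvEn arr t k, ?_, ?_⟩
        · rw [pvEn_peel arr t (k - 1) hkm1, hecT, if_pos rfl, hk1e]
          congr 1
          have : ((k - 1 : Nat) : Int) = (k : Int) - 1 := by omega
          rw [this]; ring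
        · intro s
          rw [hdrop, hbk, pvGoB_cons_eq_some, pvGoB_acc,
            show (k : Int) + 1 - 1 = (k : Int) from by ring]
          have ha := (pvZip_inv arr t (k + 1) (by omega)).1 (Or.inr (by simpa using hbk))
          rw [hidx] at *
          rw [ha]
          rw [pvSt_peel arr t k hkn, hscF, pvEn_peel arr t k hkn, hecFk]
          simp
      · -- the run continues through k
        have hecF : pvEndCond arr t (k - 1) = false := by
          have hne : ¬ (k - 1 = arr.length - 1) := by omega
          simp [pvEndCond, hbadkm, hk1e, pvBad_some_true arr t k hkn hbk, hne]
        have hscF : pvStartCond arr t k = false := by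
          have hk0 : ¬ (k = 0) := by omega
          simp [pvStartCond, hk0, hbadkm]
        obtain ⟨e, rest, hEn, hgo⟩ :=
          (pvZip_inv arr t (k + 1) (by omega)).2 ⟨by omega, by simpa using hbk⟩
        simp only [Nat.add_sub_cancel] at hEn
        refine ⟨e, rest, ?_, ?_⟩
        · rw [pvEn_peel arr t (k - 1) hkm1, hecF, hk1e]
          simp [hEn]
        · intro s
          rw [hdrop, pvGoB_cons_ne_some _ _ _ _ _ _ hbk, hidx, hgo s,
            pvSt_peel arr t k hkn, hscF]
          simp
    · -- k = length: the open run closes at the end of the array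
      have hke : k = arr.length := by omega
      have hecT : pvEndCond arr t (k - 1) = true := by
        have hi : k - 1 = arr.length - 1 := by omega
        have hb2 : (pvBad arr t)[arr.length - 1]? = some true := hi ▸ hbadkm
        simp [pvEndCond, hi, hb2]
      refine ⟨(k : Int), pvEn arr t k, ?_, ?_⟩
      · rw [pvEn_peel arr t (k - 1) hkm1, hecT, if_pos rfl, hk1e]
        congr 1
        have : ((k - 1 : Nat) : Int) = (k : Int) - 1 := by omega
        rw [this]; ring
      · intro s
        rw [hke] at *
        simp [pvGoB, pvSt_end, pvEn_end, List.drop_length]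
termination_by arr.length - k
decreasing_by all_goals omega

-- cost bridge: A's count of non-target elements is B's count of True in the mask
theorem pvCount_true_map (l : List Int) (p : Int → Bool) :
    (l.filter p).length = (l.map p).count true := by
  induction l with
  | nil => simp
  | cons v rest ih =>
      by_cases hv : p v = true <;> simp [List.filter_cons, List.count_cons, hv, ih]

theorem pvCnt_eq_count (arr : List Int) (t : Int) :
    pvCnt arr t = (((pvBad arr t).count true : Nat) : Int) := by
  unfold pvCnt pvBad
  congr 1
  exact pvCount_true_map arr (fun v => decide (v ≠ t))

-- ===== VERDICT (by name: the statement is the Claim_ definition above) =====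
theorem find_min_cost_operations_spec : Claim_equal_find_min_cost_operations := by
  intro array _hdom hpre
  unfold Spec_find_min_cost_operations
  rcases hmin : PySem.List.min? array (fun x => x) with _ | target
  · exact absurd ((PySem.List.min?_eq_none_iff array (fun x => x)).mp hmin) hpre
  · simp only [find_min_cost_operations, find_min_cost_operations_alt, hmin]
    rw [pvGoA_inv array.length array target 0 0 [] rfl (by omega) (by simp)]
    have hzip := (pvZip_inv array target 0 (by omega)).1 (Or.inl rfl)
    simp only [List.drop_zero, Nat.cast_zero, zero_add] at hzip ⊢
    rw [List.nil_append] 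
    refine congrArg₂ Prod.mk rfl (congrArg₂ Prod.mk ?_ ?_)
    · rw [pvCnt_eq_count]; rfl
    · rw [hzip]
      simp only [pvSt, pvEn, Nat.sub_zero, ← List.range_eq_range']
      rfl
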